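-- pv_equiv track=rewrite | github.com/MrBrantCode/unitest_baseline | mut_generate/mist_train_cf/cf_5874/solution.py | remove_carrots
-- ===== SOURCE A (Python) =====
-- def remove_carrots(lst):
--     if not lst:
--         return []
--
--     result = []
--     has_carrots = False
--     for element in lst:
--         if element == "Carrots":
--             if not has_carrots:
--                 result.append(element)
--                 has_carrots = True
--         else:
--             result.append(element)
--
--     return result
-- ===== SOURCE B (Python) =====
-- def remove_carrots(lst):
--     first = None
--     for i, x in enumerate(lst):
--         if x == "Carrots":
--             first = i
--             break
--     return [x for i, x in enumerate(lst) if not (x == "Carrots" and i != first)]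
-- ===== Notes on version B (the rewrite author's own statement) =====
-- stated objective: alternative
-- what changed: Replaces the stateful boolean-flag accumulation pass with a two-phase plan: first locate the index of the first 'Carrots' (None if absent), then build the result with a single filtered comprehension over enumerate that drops exactly the Carrots occurrences at other indices.
import Mathlib
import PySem

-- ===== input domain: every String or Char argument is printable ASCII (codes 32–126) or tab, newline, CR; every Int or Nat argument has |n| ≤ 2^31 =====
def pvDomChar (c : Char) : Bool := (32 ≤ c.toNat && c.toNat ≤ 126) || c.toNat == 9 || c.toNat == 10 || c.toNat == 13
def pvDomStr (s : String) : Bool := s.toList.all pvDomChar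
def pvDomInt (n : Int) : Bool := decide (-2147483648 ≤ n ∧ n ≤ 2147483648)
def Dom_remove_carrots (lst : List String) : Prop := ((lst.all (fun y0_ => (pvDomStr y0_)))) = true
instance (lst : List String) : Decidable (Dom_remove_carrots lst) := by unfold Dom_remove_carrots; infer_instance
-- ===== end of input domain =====

-- B replaces A's stateful boolean-flag pass by a two-phase plan (find the first
-- 'Carrots' index, then one filtered pass over enumerate); alternative decomposition, same cost.

-- ===== PORT A =====
-- stateful single pass: accumulator (result, has_carrots)
def remove_carrots (lst : List String) : List String :=
  if lst = [] then []
  else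
    (lst.foldl (fun (s : List String × Bool) element =>
      if element = "Carrots" then
        if s.2 = false then (s.1 ++ [element], true) else s
      else (s.1 ++ [element], s.2)) ([], false)).1

-- ===== PORT B =====
-- Source B phase 1: scan enumerate(lst) for the first 'Carrots', break on first hit
def findFirstCarrot : List (Int × String) → Option Int
  | [] => none
  | (i, x) :: t => if x = "Carrots" then some i else findFirstCarrot t

-- Source B phase 2: filtered comprehension over enumerate(lst)
def remove_carrots_alt (lst : List String) : List String :=
  let first := findFirstCarrot (PySem.List.enumerate lst)
  (PySem.List.enumerate lst).filterMap (fun p =>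
    if p.2 = "Carrots" ∧ ¬(some p.1 = first) then none else some p.2)

-- ===== PRECONDITION & SPEC =====
def Spec_remove_carrots (lst : List String) (out : List String) : Prop := out = remove_carrots_alt lst
instance (lst : List String) (out : List String) : Decidable (Spec_remove_carrots lst out) := by unfold Spec_remove_carrots; infer_instance

-- ===== CLAIM (what is proved, stated in full; the proofs are below) =====
def Claim_equal_remove_carrots : Prop := ∀ (lst : List String), Dom_remove_carrots lst → Spec_remove_carrots lst (remove_carrots lst)

-- ===== LEMMAS AND PROOFS =====

-- reference function: A's semantics with the flag made structural
def goCarrot : List String → Bool → List String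
  | [], _ => []
  | e :: t, b =>
    if e = "Carrots" then (if b then goCarrot t true else e :: goCarrot t true)
    else e :: goCarrot t b

theorem foldA_eq (t : List String) (acc : List String) (b : Bool) :
    (t.foldl (fun (s : List String × Bool) element =>
      if element = "Carrots" then
        if s.2 = false then (s.1 ++ [element], true) else s
      else (s.1 ++ [element], s.2)) (acc, b)).1 = acc ++ goCarrot t b := by
  induction t generalizing acc b with
  | nil => simp [goCarrot]
  | cons e t ih =>
    by_cases he : e = "Carrots"
    · cases b <;> simp [List.foldl, he, goCarrot, ih]
    · cases b <;> simp [List.foldl, he, goCarrot, ih]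

theorem A_eq_go (lst : List String) : remove_carrots lst = goCarrot lst false := by
  unfold remove_carrots
  rcases lst with _ | ⟨e, t⟩
  · simp [goCarrot]
  · by_cases he : e = "Carrots" <;>
      simp [List.foldl, he, goCarrot, foldA_eq]

theorem filt_all_drop (t : List String) (s : Int) (o : Option Int)
    (ho : ∀ p ∈ PySem.List.enumerate t s, some p.1 ≠ o) :
    (PySem.List.enumerate t s).filterMap (fun p =>
      if p.2 = "Carrots" ∧ ¬(some p.1 = o) then none else some p.2) = goCarrot t true := by
  induction t generalizing s with
  | nil => simp [PySem.List.enumerate_nil, goCarrot]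
  | cons e t ih =>
    rw [PySem.List.enumerate_cons] at *
    have h0 : some s ≠ o := ho (s, e) (by simp)
    have htl := ih (s + 1) (fun p hp => ho p (by simp [hp]))
    by_cases he : e = "Carrots"
    · subst he
      rw [List.filterMap_cons_none (by simp [h0])]
      rw [htl]
      simp [goCarrot]
    · rw [List.filterMap_cons_some (b := e) (by simp [he])]
      rw [htl]
      simp [goCarrot, he]

theorem enumerate_fst_ge (t : List String) (s : Int) :
    ∀ p ∈ PySem.List.enumerate t s, s ≤ p.1 := by
  intro p hp
  rcases (PySem.List.mem_enumerate_iff t s p).1 hp with ⟨k, hk, rfl⟩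
  simp

theorem B_eq_go (t : List String) (s : Int) :
    (PySem.List.enumerate t s).filterMap (fun p =>
      if p.2 = "Carrots" ∧ ¬(some p.1 = findFirstCarrot (PySem.List.enumerate t s)) then none
      else some p.2) = goCarrot t false := by
  induction t generalizing s with
  | nil => simp [PySem.List.enumerate_nil, goCarrot]
  | cons e t ih =>
    rw [PySem.List.enumerate_cons]
    by_cases he : e = "Carrots"
    · subst he
      have hf : findFirstCarrot ((s, "Carrots") :: PySem.List.enumerate t (s + 1))
          = some s := by simp [findFirstCarrot]
      rw [hf]
      rw [List.filterMap_cons_some (b := "Carrots") (by simp)]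
      rw [filt_all_drop t (s + 1) (some s)
        (fun p hp => by have := enumerate_fst_ge t (s + 1) p hp; simp; omega)]
      simp [goCarrot]
    · have hf : findFirstCarrot ((s, e) :: PySem.List.enumerate t (s + 1))
          = findFirstCarrot (PySem.List.enumerate t (s + 1)) := by
        simp [findFirstCarrot, he]
      rw [hf]
      rw [List.filterMap_cons_some (b := e) (by simp [he])]
      rw [ih (s + 1)]
      simp [goCarrot, he]

-- ===== VERDICT (by name: the statement is the Claim_ definition above) =====
theorem remove_carrots_spec : Claim_equal_remove_carrots := by
  intro lst _
  show remove_carrots lst = remove_carrots_alt lst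
  rw [A_eq_go]
  exact (B_eq_go lst 0).symm
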